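-- pv_equiv track=rewrite | github.com/davidmartinezhi/Delivery-service-multiagents | Map/map_misc.py | build_set
-- ===== SOURCE A (Python) =====
-- def build_set(seq):
--     if len(seq) == 0:
--         return None
--
--     new_set = set()
--     for elem in seq:
--         if elem in new_set:
--             return None
--         new_set.add(elem)
--
--     return new_set
-- ===== SOURCE B (Python) =====
-- def build_set(seq):
--     if not seq:
--         return None
--     t = sorted(seq)
--     for a, b in zip(t, t[1:]):
--         if a == b:
--             return None
--     return set(seq)
-- ===== Notes on version B (the rewrite author's own statement) =====
-- stated objective: alternative
-- what changed: Detects duplicates by sorting a copy and scanning adjacent pairs instead of A's incremental hash-set membership loop; the set is built only once the sequence is known to be duplicate-free.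
import Mathlib
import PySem

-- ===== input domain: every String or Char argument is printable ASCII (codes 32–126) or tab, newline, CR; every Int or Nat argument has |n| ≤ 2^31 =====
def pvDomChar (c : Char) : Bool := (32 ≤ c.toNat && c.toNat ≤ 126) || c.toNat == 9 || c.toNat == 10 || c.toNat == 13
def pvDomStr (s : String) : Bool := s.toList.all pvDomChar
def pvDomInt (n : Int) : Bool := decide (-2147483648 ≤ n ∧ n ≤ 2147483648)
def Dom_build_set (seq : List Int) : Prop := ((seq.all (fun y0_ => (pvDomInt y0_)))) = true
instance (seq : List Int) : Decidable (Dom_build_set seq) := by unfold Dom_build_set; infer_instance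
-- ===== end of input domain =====

-- B detects duplicates by sorting a copy and scanning adjacent pairs instead of A's
-- incremental membership loop; objective: alternative (same answers, different mechanism).

-- ===== PORT A =====
-- the 'for elem in seq' loop: early-exit none on a repeated element, else accumulate
def build_set_loop (s : PySem.Set Int) : List Int → Option (List Int)
  | [] => some s
  | e :: rest =>
    if PySem.Set.contains s e then none
    else build_set_loop (PySem.Set.add s e) rest

def build_set (seq : List Int) : Option (List Int) :=
  if seq.length = 0 then none
  else build_set_loop PySem.Set.empty seq

-- ===== PORT B =====
-- the 'for a, b in zip(t, t[1:])' scan: true iff some adjacent pair of t is equal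
def adjDup : List Int → Bool
  | a :: b :: r => a == b || adjDup (b :: r)
  | _ => false

def build_set_alt (seq : List Int) : Option (List Int) :=
  if seq = [] then none
  else
    let t := PySem.List.sorted seq (fun x => x) false
    if adjDup t then none
    else some (PySem.Set.ofList seq)

-- ===== PRECONDITION & SPEC =====
def Spec_build_set (seq : List Int) (out : Option (List Int)) : Prop := out = build_set_alt seq
instance (seq : List Int) (out : Option (List Int)) : Decidable (Spec_build_set seq out) := by unfold Spec_build_set; infer_instance

-- ===== CLAIM =====
def Claim_equal_build_set : Prop := ∀ (seq : List Int), Dom_build_set seq → Spec_build_set seq (build_set seq)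

-- ===== LEMMAS AND PROOFS =====

-- A's loop: returns some (s ++ rest) iff rest is duplicate-free and disjoint from s
theorem build_set_loop_eq (rest : List Int) : ∀ (s : PySem.Set Int),
    build_set_loop s rest =
      if rest.Nodup ∧ ∀ x ∈ rest, x ∉ s then some (s ++ rest) else none := by
  induction rest with
  | nil => intro s; simp [build_set_loop]
  | cons e rest ih =>
    intro s
    by_cases he : e ∈ s
    · simp [build_set_loop, he]
    · simp only [build_set_loop]
      rw [if_neg (by simpa using he), PySem.Set.add_of_not_mem he, ih]
      have hiff : (rest.Nodup ∧ ∀ x ∈ rest, x ∉ s ++ [e]) ↔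
          ((e :: rest).Nodup ∧ ∀ x ∈ e :: rest, x ∉ s) := by
        constructor
        · rintro ⟨hn, hd⟩
          refine ⟨List.nodup_cons.mpr ⟨fun h => hd e h (by simp), hn⟩, ?_⟩
          intro x hx
          rcases List.mem_cons.mp hx with h | h
          · exact h ▸ he
          · exact fun hm => hd x h (List.mem_append.mpr (Or.inl hm))
        · rintro ⟨hn, hd⟩
          refine ⟨(List.nodup_cons.mp hn).2, fun x hx hm => ?_⟩
          rcases List.mem_append.mp hm with h | h
          · exact hd x (List.mem_cons.mpr (Or.inr hx)) h
          · exact (List.nodup_cons.mp hn).1 ((List.mem_singleton.mp h) ▸ hx)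
      by_cases hcase : (e :: rest).Nodup ∧ ∀ x ∈ e :: rest, x ∉ s
      · rw [if_pos (hiff.mpr hcase), if_pos hcase]; simp
      · rw [if_neg (fun h => hcase (hiff.mp h)), if_neg hcase]

-- on a list sorted in nondecreasing order, no adjacent duplicate ⇔ no duplicate at all
theorem adjDup_false_iff_nodup (t : List Int) (hs : t.Pairwise (· ≤ ·)) :
    adjDup t = false ↔ t.Nodup := by
  induction t with
  | nil => simp [adjDup]
  | cons a t ih =>
    cases t with
    | nil => simp [adjDup]
    | cons b r =>
      have hpw : (b :: r).Pairwise (· ≤ ·) := hs.tail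
      have hab : a ≤ b := (List.pairwise_cons.mp hs).1 b (by simp)
      have hbr : ∀ x ∈ r, b ≤ x := fun x hx => (List.pairwise_cons.mp hpw).1 x hx
      simp only [adjDup, Bool.or_eq_false_iff, beq_eq_false_iff_ne, ne_eq]
      rw [ih hpw]
      constructor
      · rintro ⟨hne, hnd⟩
        refine List.nodup_cons.mpr ⟨?_, hnd⟩
        intro hmem
        rcases List.mem_cons.mp hmem with h | h
        · exact hne h
        · have : b ≤ a := hbr a h
          exact hne (le_antisymm hab this)
      · intro hnd
        have := List.nodup_cons.mp hnd
        exact ⟨fun h => this.1 (h ▸ List.mem_cons_self), this.2⟩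

theorem adjDup_sorted_iff (seq : List Int) :
    adjDup (PySem.List.sorted seq (fun x => x) false) = false ↔ seq.Nodup := by
  rw [adjDup_false_iff_nodup _ (by simpa using PySem.List.sorted_pairwise seq (fun x => x))]
  exact (PySem.List.sorted_perm seq (fun x => x) false).nodup_iff

-- ===== VERDICT =====
theorem build_set_spec : Claim_equal_build_set := by
  intro seq _
  unfold Spec_build_set build_set build_set_alt
  by_cases h0 : seq = []
  · simp [h0]
  · rw [if_neg (by simpa using h0), if_neg h0, build_set_loop_eq]
    by_cases hn : seq.Nodup
    · have hself := PySem.Set.ofList_eq_self_of_nodup seq hn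
      rw [if_pos ⟨hn, by simp [PySem.Set.empty]⟩,
        if_neg (by simp [(adjDup_sorted_iff seq).mpr hn]), hself]
      simp
    · rw [if_neg (by rintro ⟨h, -⟩; exact hn h),
        if_pos (by
          rcases Bool.eq_false_or_eq_true (adjDup (PySem.List.sorted seq (fun x => x) false)) with h | h
          · exact h
          · exact absurd ((adjDup_sorted_iff seq).mp h) hn)]
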